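-- pv_equiv track=rewrite | github.com/alsrudk/python_study | week06/[3차]n진수게임/kjg.py | n_change
-- ===== SOURCE A (Python) =====
-- def n_change(n,t,m):
--     n_change = ''
--     dic = {10:'A', 11:'B', 12:'C', 13:'D', 14:'E', 15:'F'}
--     for i in range(t*m):
--         if i == 0:
--             n_change+=str(i)
--         else:
--             num = ''
--             while i>0:
--                 if i%n > 9:
--                     num+=dic[i%n]
--                 else:
--                     num+=str(i%n)
--                 i //= n
--             num = num[::-1]
--             n_change+=num
--     return n_change
-- ===== SOURCE B (Python) =====
-- def n_change(n, t, m):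
--     dic = {10: 'A', 11: 'B', 12: 'C', 13: 'D', 14: 'E', 15: 'F'}
--
--     def digit(d):
--         return dic[d] if d > 9 else str(d)
--
--     def conv(x):
--         if x <= 0:
--             return ''
--         return conv(x // n) + digit(x % n)
--
--     return ''.join('0' if i == 0 else conv(i) for i in range(t * m))
-- ===== Notes on version B (the rewrite author's own statement) =====
-- stated objective: simpler
-- what changed: Replaces the iterative extract-digits-then-reverse-the-string inner loop and string concatenation with a recursive most-significant-digit-first conversion and a join over a generator, eliminating the reversal step entirely.
-- outside the precondition, e.g. on n_change(-2, 1, 4): A returns '01-01-', B returns '0-10-1'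
import Mathlib
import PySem

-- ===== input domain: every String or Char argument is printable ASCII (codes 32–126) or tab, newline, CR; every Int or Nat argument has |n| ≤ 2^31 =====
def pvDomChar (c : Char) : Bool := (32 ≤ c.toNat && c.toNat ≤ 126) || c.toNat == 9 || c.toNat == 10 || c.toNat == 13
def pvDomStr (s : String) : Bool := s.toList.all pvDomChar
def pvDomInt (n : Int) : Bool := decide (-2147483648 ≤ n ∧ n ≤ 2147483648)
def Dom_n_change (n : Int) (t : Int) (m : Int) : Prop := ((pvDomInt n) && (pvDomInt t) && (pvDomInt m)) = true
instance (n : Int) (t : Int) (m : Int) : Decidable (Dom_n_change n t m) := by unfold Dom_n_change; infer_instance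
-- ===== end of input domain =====

-- B replaces A's extract-then-reverse inner while loop and string accumulator with a recursive
-- most-significant-digit-first base conversion joined over the range (objective: simpler).


-- ===== PORT A =====
-- dic = {10:'A', 11:'B', 12:'C', 13:'D', 14:'E', 15:'F'}
def pvDicA : PySem.Dict Int String :=
  PySem.Dict.ofList [(10, "A"), (11, "B"), (12, "C"), (13, "D"), (14, "E"), (15, "F")]

-- while i > 0: num += dic[i%n] if i%n > 9 else str(i%n); i //= n
-- fuel-bounded recursion (fuel = i.toNat suffices inside Pre_); the dict lookup is getD "" —
-- inside Pre_ a digit > 9 is always a key of dic (the KeyError input is excluded by Pre_)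
def pvWhileA (n : Int) : Nat → Int → List Char → List Char
  | 0, _, num => num
  | f + 1, i, num =>
    if i > 0 then
      pvWhileA n f (PySem.Int.floordiv i n)
        (num ++ (if PySem.Int.mod i n > 9 then (pvDicA.getD (PySem.Int.mod i n) "").toList
                 else (PySem.Int.toStr (PySem.Int.mod i n)).toList))
    else num

def n_change (n : Int) (t : Int) (m : Int) : String :=
  String.ofList ((PySem.List.pyRange 0 (t * m) 1).foldl
    (fun acc i =>
      if i = 0 then acc ++ (PySem.Int.toStr i).toList
      else acc ++ (pvWhileA n i.toNat i []).reverse)  -- num = num[::-1]; n_change += num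
    [])

-- ===== PORT B =====
def pvDicB : PySem.Dict Int String :=
  PySem.Dict.ofList [(10, "A"), (11, "B"), (12, "C"), (13, "D"), (14, "E"), (15, "F")]

-- digit(d) = dic[d] if d > 9 else str(d)
def pvDigitB (d : Int) : List Char :=
  if d > 9 then (pvDicB.getD d "").toList else (PySem.Int.toStr d).toList

-- conv(x) = '' if x <= 0 else conv(x // n) + digit(x % n)   (fuel = x.toNat suffices inside Pre_)
def pvConvB (n : Int) : Nat → Int → List Char
  | 0, _ => []
  | f + 1, x =>
    if x ≤ 0 then []
    else pvConvB n f (PySem.Int.floordiv x n) ++ pvDigitB (PySem.Int.mod x n)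

-- ''.join('0' if i == 0 else conv(i) for i in range(t * m))
def n_change_alt (n : Int) (t : Int) (m : Int) : String :=
  String.ofList (PySem.Chars.join []
    ((PySem.List.pyRange 0 (t * m) 1).map
      (fun i => if i = 0 then ['0'] else pvConvB n i.toNat i)))

-- ===== PRECONDITION & SPEC =====
-- Pre_ excludes bases n ≤ 1 when t*m ≥ 2 (A loops forever for n = 1, raises ZeroDivisionError for
-- n = 0, and for negative n its character-level string reversal scrambles the '-' sign of negative
-- remainders, an artefact like '01-01-') and bases n ≥ 17 when t*m ≥ 17 (KeyError on digit 16).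
def Pre_n_change (n : Int) (t : Int) (m : Int) : Prop :=
  t * m ≤ 1 ∨ (2 ≤ n ∧ (n ≤ 16 ∨ t * m ≤ 16))
instance (n : Int) (t : Int) (m : Int) : Decidable (Pre_n_change n t m) := by
  unfold Pre_n_change; infer_instance

def pvWitness_n_change : Int × Int × Int := (2, 2, 3)

def Spec_n_change (n : Int) (t : Int) (m : Int) (out : String) : Prop := out = n_change_alt n t m
instance (n : Int) (t : Int) (m : Int) (out : String) : Decidable (Spec_n_change n t m out) := by
  unfold Spec_n_change; infer_instance

-- ===== CLAIM (what is proved, stated in full; the proofs are below) =====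
def Claim_equal_n_change : Prop :=
  ∀ (n : Int) (t : Int) (m : Int), Dom_n_change n t m → Pre_n_change n t m →
    Spec_n_change n t m (n_change n t m)

-- ===== LEMMAS AND PROOFS =====

-- the digit expression inlined in A's while body is B's digit helper
theorem pvDigitA_eq (d : Int) :
    (if d > 9 then (pvDicA.getD d "").toList else (PySem.Int.toStr d).toList) = pvDigitB d := rfl

theorem pvDic_getD_big (d : Int) (h : 16 ≤ d) : pvDicB.getD d "" = "" := by
  have e : pvDicB = PySem.Dict.mk [(10, "A"), (11, "B"), (12, "C"), (13, "D"), (14, "E"), (15, "F")] := rfl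
  rw [e]
  simp only [PySem.Dict.getD, PySem.Dict.get?_mk_cons]
  have h10 : ((10:Int) == d) = false := by simp; omega
  have h11 : ((11:Int) == d) = false := by simp; omega
  have h12 : ((12:Int) == d) = false := by simp; omega
  have h13 : ((13:Int) == d) = false := by simp; omega
  have h14 : ((14:Int) == d) = false := by simp; omega
  have h15 : ((15:Int) == d) = false := by simp; omega
  simp [h10, h11, h12, h13, h14, h15, PySem.Dict.get?]

-- every digit string produced inside Pre_ has at most one character, so reversing it is a no-op
theorem pvDigitB_rev (d : Int) (h : 0 ≤ d) : (pvDigitB d).reverse = pvDigitB d := by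
  by_cases h15 : d ≤ 15
  · unfold pvDigitB; interval_cases d <;> decide
  · unfold pvDigitB
    rw [if_pos (by omega), pvDic_getD_big d (by omega)]
    rfl

theorem pvWhileA_append (n : Int) (f : Nat) :
    ∀ (i : Int) (num : List Char), pvWhileA n f i num = num ++ pvWhileA n f i [] := by
  induction f with
  | zero => intro i num; simp [pvWhileA]
  | succ f ih =>
    intro i num
    by_cases hi : i > 0
    · simp only [pvWhileA, if_pos hi]
      rw [ih _ (num ++ _), ih _ ([] ++ _)]
      simp [List.append_assoc]
    · simp [pvWhileA, hi]

theorem pvFloordiv_lt (x n : Int) (hx : 0 < x) (hn : 2 ≤ n) :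
    PySem.Int.floordiv x n < x ∧ 0 ≤ PySem.Int.floordiv x n := by
  rw [PySem.Int.floordiv_eq_ediv_of_pos (by omega)]
  exact ⟨Int.ediv_lt_of_lt_mul (by omega) (by nlinarith), Int.ediv_nonneg (by omega) (by omega)⟩

-- the reversed digit string of A's while loop is exactly B's MSB-first recursion
theorem pvInner_eq (n : Int) (hn : 2 ≤ n) :
    ∀ (f : Nat) (x : Int), x.toNat ≤ f → (pvWhileA n f x []).reverse = pvConvB n f x := by
  intro f
  induction f with
  | zero => intro x _; simp [pvWhileA, pvConvB]
  | succ f ih =>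
    intro x hxf
    by_cases hx : 0 < x
    · have hy := pvFloordiv_lt x n hx hn
      have hyf : (PySem.Int.floordiv x n).toNat ≤ f := by omega
      have hd : 0 ≤ PySem.Int.mod x n := PySem.Int.mod_nonneg x (by omega)
      simp only [pvWhileA, if_pos hx, pvDigitA_eq]
      rw [pvWhileA_append, List.nil_append, List.reverse_append, ih _ hyf, pvDigitB_rev _ hd]
      simp only [pvConvB, if_neg (by omega : ¬ x ≤ 0)]
    · simp [pvWhileA, pvConvB, hx, (by omega : x ≤ 0)]

theorem pvJoin_nil_flatten (l : List (List Char)) : PySem.Chars.join [] l = l.flatten := by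
  induction l with
  | nil => rfl
  | cons x xs ih => cases xs <;> simp_all [PySem.Chars.join, List.intercalate, List.intersperse]

theorem pvFoldl_flatten (g : Int → List Char) :
    ∀ (l : List Int) (acc : List Char),
      l.foldl (fun a i => a ++ g i) acc = acc ++ (l.map g).flatten := by
  intro l
  induction l with
  | nil => simp
  | cons x xs ih => intro acc; simp [List.foldl_cons, ih, List.append_assoc]

-- ===== VERDICT (by name: the statement is the Claim_ definition above) =====
theorem n_change_spec : Claim_equal_n_change := by
  intro n t m _ hpre
  unfold Spec_n_change n_change n_change_alt
  rw [pvJoin_nil_flatten]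
  have hfun : (fun (acc : List Char) (i : Int) =>
        if i = 0 then acc ++ (PySem.Int.toStr i).toList
        else acc ++ (pvWhileA n i.toNat i []).reverse)
      = (fun (acc : List Char) (i : Int) => acc ++
        (if i = 0 then (PySem.Int.toStr i).toList else (pvWhileA n i.toNat i []).reverse)) := by
    funext acc i; split <;> rfl
  rw [hfun, pvFoldl_flatten, List.nil_append]
  congr 1
  apply congrArg
  apply List.map_congr_left
  intro i hi
  rw [PySem.List.mem_pyRange_one] at hi
  by_cases hi0 : i = 0
  · subst hi0; simp; decide
  · have h1 : 1 ≤ i := by omega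
    have hn : 2 ≤ n := by
      rcases hpre with h | h
      · omega
      · exact h.1
    rw [if_neg hi0, if_neg hi0, pvInner_eq n hn i.toNat i (le_refl _)]
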